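-- pv_equiv track=rewrite | github.com/arnaud070291/adventcode | exo13.py | to_letters
-- ===== SOURCE A (Python) =====
-- lettres = 'abcdefghijklmnopqrstuvwxyz0123456789'
--
-- def to_letters(pattern) :
--     i = 0
--     L = []
--     DIC = {}
--     for line in pattern.split('\n') :
--         if not line : continue
--         if line not in DIC :
--             DIC[line] = lettres[i]
--             i+=1
--         L.append(DIC[line])
--
--     letters = "".join(L)
--     return letters
-- ===== SOURCE B (Python) =====
-- lettres = 'abcdefghijklmnopqrstuvwxyz0123456789'
--
-- def to_letters(pattern):
--     # Stateless: a line's letter index is the number of distinct lines in the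
--     # prefix of `lines` ending at that line's first occurrence, minus one.
--     lines = [l for l in pattern.split('\n') if l]
--     return ''.join(lettres[len(set(lines[:lines.index(l) + 1])) - 1] for l in lines)
-- ===== Notes on version B (the rewrite author's own statement) =====
-- stated objective: alternative
-- what changed: A threads mutable state (a counter and a growing dict) through one pass; B is stateless: for each line it computes the letter index directly as the number of distinct lines in the prefix ending at that line's first occurrence, minus one, trading the dict for per-element prefix set-counting.
import Mathlib
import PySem

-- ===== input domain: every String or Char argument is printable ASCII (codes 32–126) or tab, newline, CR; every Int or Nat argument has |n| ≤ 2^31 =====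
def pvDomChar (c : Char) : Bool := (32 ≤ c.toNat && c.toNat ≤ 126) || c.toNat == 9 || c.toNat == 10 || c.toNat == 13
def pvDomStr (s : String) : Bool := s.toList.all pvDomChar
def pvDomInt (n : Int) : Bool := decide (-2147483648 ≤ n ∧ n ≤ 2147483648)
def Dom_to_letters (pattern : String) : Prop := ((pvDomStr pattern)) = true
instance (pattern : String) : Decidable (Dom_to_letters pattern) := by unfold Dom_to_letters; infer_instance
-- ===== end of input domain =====

-- B replaces A's stateful pass (counter + growing dict) by a stateless computation:
-- each line's letter index is the distinct-count of the prefix up to its first occurrence, minus one.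

-- ===== PORT A =====
-- lettres, as a list of chars (both ports index into it; lettres[i] is Python's string indexing)
def pvLettres : List Char := "abcdefghijklmnopqrstuvwxyz0123456789".toList

-- A's for-loop over the lines, state (i, L, DIC); lettres[i] is ported as pyGetD with a
-- default ' ' that Pre_ guarantees is never used (Python raises IndexError there).
def toLettersLoop : List String → Nat → List Char → PySem.Dict String Char → List Char
  | [], _, L, _ => L
  | line :: rest, i, L, D =>
    if line = "" then toLettersLoop rest i L D
    else
      let p := if D.contains line then (i, D)
               else (i + 1, D.insert line (PySem.List.pyGetD pvLettres (i : Int) ' '))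
      toLettersLoop rest p.1 (L ++ [p.2.getD line ' ']) p.2

def to_letters (pattern : String) : String :=
  String.ofList (toLettersLoop ((PySem.Str.split? pattern "\n").getD []) 0 [] PySem.Dict.empty)

-- ===== PORT B =====
-- lines.index(l) never raises here (l is drawn from lines), so it is ported as index? with getD 0;
-- lettres[...] is pyGetD with a default ' ' that Pre_ guarantees is never used.
def to_letters_alt (pattern : String) : String :=
  let lines := ((PySem.Str.split? pattern "\n").getD []).filter (fun l => l ≠ "")
  String.ofList (lines.map (fun l =>
    PySem.List.pyGetD pvLettres
      (((PySem.Set.ofList (PySem.List.slice lines none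
          (some ((((PySem.List.index? lines l).getD 0 : Nat) : Int) + 1)))).length : Int) - 1) ' '))

-- ===== PRECONDITION & SPEC =====
-- Pre_ excludes exactly the inputs with more than 36 distinct non-empty lines, where the
-- Python A raises IndexError on lettres[i] (B raises the same way).
def Pre_to_letters (pattern : String) : Prop :=
  (PySem.List.dedup (((PySem.Str.split? pattern "\n").getD []).filter (fun l => l ≠ ""))).length ≤ 36
instance (pattern : String) : Decidable (Pre_to_letters pattern) := by
  unfold Pre_to_letters; infer_instance
def pvWitness_to_letters : String := "ab\ncd\n\nab"

def Spec_to_letters (pattern : String) (out : String) : Prop := out = to_letters_alt pattern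
instance (pattern : String) (out : String) : Decidable (Spec_to_letters pattern out) := by
  unfold Spec_to_letters; infer_instance

-- ===== CLAIM (what is proved, stated in full; the proofs are below) =====
def Claim_equal_to_letters : Prop := ∀ (pattern : String), Dom_to_letters pattern → Pre_to_letters pattern → Spec_to_letters pattern (to_letters pattern)

-- ===== LEMMAS AND PROOFS =====

-- the dict mapping the j-th element of ord to lettres[j] (the invariant shape of A's DIC)
def pvDictOf (ord : List String) : PySem.Dict String Char :=
  (PySem.List.enumerate ord).foldl
    (fun d p => d.insert p.2 (PySem.List.pyGetD pvLettres p.1 ' ')) PySem.Dict.empty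

-- the distinct non-empty lines of ls not already in ord, in first-occurrence order
def pvFresh : List String → List String → List String
  | [], _ => []
  | l :: rest, ord =>
    if l = "" ∨ l ∈ ord then pvFresh rest ord
    else l :: pvFresh rest (ord ++ [l])

theorem pvDictOf_append_singleton (ord : List String) (x : String) :
    pvDictOf (ord ++ [x]) =
      (pvDictOf ord).insert x (PySem.List.pyGetD pvLettres (ord.length : Int) ' ') := by
  simp [pvDictOf, PySem.List.enumerate_append, PySem.List.enumerate_cons]

theorem pvDictOf_keys (ord : List String) (h : ord.Nodup) : (pvDictOf ord).keys = ord := by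
  unfold pvDictOf
  rw [PySem.Dict.keys_foldl_insert_key (key := fun p : Int × String => p.2)]
  simp [PySem.List.map_snd_enumerate, PySem.Dict.keys_empty,
    PySem.Set.update_nil_left, PySem.Set.ofList_eq_self_of_nodup _ h]

theorem pvDictOf_contains (ord : List String) (h : ord.Nodup) (l : String) :
    (pvDictOf ord).contains l = decide (l ∈ ord) := by
  have hiff := PySem.Dict.contains_iff_mem_keys (d := pvDictOf ord) (k := l)
  rw [pvDictOf_keys ord h] at hiff
  by_cases hm : l ∈ ord
  · simp [hiff.2 hm, hm]
  · have : ¬ (pvDictOf ord).contains l = true := fun hc => hm (hiff.1 hc)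
    simp [Bool.eq_false_iff.2 (fun hc => this hc), hm]

theorem pvDictOf_getD_stable (ord t : List String) (l : String)
    (hmem : l ∈ ord) (hnd : (ord ++ t).Nodup) :
    (pvDictOf (ord ++ t)).getD l ' ' = (pvDictOf ord).getD l ' ' := by
  induction t using List.reverseRecOn with
  | nil => simp
  | append_singleton t' x ih =>
    rw [← List.append_assoc] at hnd ⊢
    rw [pvDictOf_append_singleton]
    have hne : l ≠ x := by
      intro he; subst he
      have := List.disjoint_of_nodup_append hnd
      exact this (List.mem_append_left _ hmem) (List.mem_singleton_self _)
    rw [PySem.Dict.getD_insert_of_ne _ _ _ hne]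
    exact ih (hnd.sublist (by simp))

theorem pvFresh_nodup (ls : List String) : ∀ ord : List String, ord.Nodup →
    (ord ++ pvFresh ls ord).Nodup := by
  induction ls with
  | nil => intro ord h; simpa [pvFresh] using h
  | cons l rest ih =>
    intro ord h
    by_cases hc : l = "" ∨ l ∈ ord
    · simpa [pvFresh, hc] using ih ord h
    · rw [not_or] at hc
      have h' : (ord ++ [l]).Nodup := by
        simp only [List.nodup_append, List.nodup_singleton, true_and]
        refine ⟨h, ?_⟩
        intro a ha b hb he
        rw [List.mem_singleton] at hb
        exact hc.2 (hb ▸ he ▸ ha)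
      have := ih (ord ++ [l]) h'
      simpa [pvFresh, hc.1, hc.2] using this

theorem pvLoop_eq (ls : List String) : ∀ (ord : List String) (L : List Char),
    ord.Nodup →
    toLettersLoop ls ord.length L (pvDictOf ord)
      = L ++ (ls.filter (fun l => l ≠ "")).map
          (fun l => (pvDictOf (ord ++ pvFresh ls ord)).getD l ' ') := by
  induction ls with
  | nil => intro ord L _; simp [toLettersLoop, pvFresh]
  | cons l rest ih =>
    intro ord L h
    by_cases h0 : l = ""
    · simp only [toLettersLoop, h0]
      simpa [pvFresh, h0] using ih ord L h
    · by_cases hm : l ∈ ord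
      · have hcont : (pvDictOf ord).contains l = true := by
          rw [pvDictOf_contains ord h]; simp [hm]
        have hfresh : pvFresh (l :: rest) ord = pvFresh rest ord := by
          simp [pvFresh, hm]
        simp only [toLettersLoop, if_neg h0, hcont, if_true]
        rw [ih ord (L ++ [(pvDictOf ord).getD l ' ']) h]
        have hst : (pvDictOf (ord ++ pvFresh rest ord)).getD l ' ' = (pvDictOf ord).getD l ' ' :=
          pvDictOf_getD_stable ord (pvFresh rest ord) l hm (pvFresh_nodup rest ord h)
        simp [hfresh, h0, hst]
      · have hcont : (pvDictOf ord).contains l = false := by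
          rw [pvDictOf_contains ord h]; simp [hm]
        have h' : (ord ++ [l]).Nodup := by
          simp only [List.nodup_append, List.nodup_singleton, true_and]
          refine ⟨h, ?_⟩
          intro a ha b hb he
          rw [List.mem_singleton] at hb
          exact hm (hb ▸ he ▸ ha)
        have hins : (pvDictOf ord).insert l (PySem.List.pyGetD pvLettres (ord.length : Int) ' ')
            = pvDictOf (ord ++ [l]) := (pvDictOf_append_singleton ord l).symm
        simp only [toLettersLoop, if_neg h0, hcont, Bool.false_eq_true, if_false, hins]
        have hlen : ord.length + 1 = (ord ++ [l]).length := by simp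
        rw [hlen, ih (ord ++ [l]) _ h']
        have hfresh : pvFresh (l :: rest) ord = l :: pvFresh rest (ord ++ [l]) := by
          simp [pvFresh, h0, hm]
        have hassoc : ord ++ pvFresh (l :: rest) ord
            = (ord ++ [l]) ++ pvFresh rest (ord ++ [l]) := by
          rw [hfresh]; simp
        have hst : (pvDictOf ((ord ++ [l]) ++ pvFresh rest (ord ++ [l]))).getD l ' '
            = (pvDictOf (ord ++ [l])).getD l ' ' :=
          pvDictOf_getD_stable (ord ++ [l]) _ l (by simp)
            (pvFresh_nodup rest (ord ++ [l]) h')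
        rw [hassoc]
        simp [h0]
        rw [show ord ++ l :: pvFresh rest (ord ++ [l])
              = ord ++ [l] ++ pvFresh rest (ord ++ [l]) by simp]
        exact hst.symm

theorem pvFresh_eq_foldl_add (ls : List String) : ∀ acc : List String,
    acc ++ pvFresh ls acc = (ls.filter (fun l => l ≠ "")).foldl PySem.Set.add acc := by
  induction ls with
  | nil => intro acc; simp [pvFresh]
  | cons l rest ih =>
    intro acc
    by_cases h0 : l = ""
    · simp [pvFresh, h0, ih acc]
    · by_cases hm : l ∈ acc
      · rw [List.filter_cons_of_pos (by simp [h0])]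
        simp only [List.foldl_cons, PySem.Set.add_of_mem hm]
        simp [pvFresh, h0, hm, ih acc]
      · rw [List.filter_cons_of_pos (by simp [h0])]
        simp only [List.foldl_cons, PySem.Set.add_of_not_mem hm]
        have : acc ++ pvFresh (l :: rest) acc = (acc ++ [l]) ++ pvFresh rest (acc ++ [l]) := by
          simp [pvFresh, h0, hm]
        rw [this, ih (acc ++ [l])]

-- A side: the dict maps the k-th distinct line to lettres[k]
theorem pvDictOf_getD_index (ord : List String) (h : ord.Nodup) (l : String) (hm : l ∈ ord) :
    (pvDictOf ord).getD l ' '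
      = PySem.List.pyGetD pvLettres (((PySem.List.index? ord l).getD 0 : Nat) : Int) ' ' := by
  induction ord using List.reverseRecOn with
  | nil => cases hm
  | append_singleton t x ih =>
    rw [pvDictOf_append_singleton]
    by_cases he : l = x
    · subst he
      have hnl : l ∉ t := by
        have := List.disjoint_of_nodup_append h
        intro ha; exact this ha (List.mem_singleton_self _)
      rw [PySem.Dict.getD_insert_self, PySem.List.index?_append_singleton_self t l hnl]
      simp
    · have hmt : l ∈ t := by
        rcases List.mem_append.1 hm with h1 | h1
        · exact h1
        · exact absurd (List.mem_singleton.1 h1) he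
      rw [PySem.Dict.getD_insert_of_ne _ _ _ he,
        PySem.List.index?_append_of_mem _ hmt]
      exact ih (h.sublist (by simp)) hmt

-- B side: the distinct-count of the prefix up to l's first occurrence is l's dedup position + 1
theorem pvPrefix_count (xs : List String) (l : String) (k : Nat)
    (hk : PySem.List.index? xs l = some k) :
    (PySem.Set.ofList (xs.take (k + 1))).length
      = ((PySem.List.index? (PySem.Set.ofList xs) l).getD 0) + 1 := by
  obtain ⟨pre, suf, hxs, hlen, hnp⟩ := (PySem.List.index?_eq_some_iff _ _ _).1 hk
  subst hxs; subst hlen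
  have htake : (pre ++ l :: suf).take (pre.length + 1) = pre ++ [l] := by
    rw [show pre ++ l :: suf = (pre ++ [l]) ++ suf by simp,
      List.take_append_of_le_length (by simp)]
    simp
  have hnotp : l ∉ PySem.Set.ofList pre := fun hc => hnp ((PySem.Set.mem_ofList _ _).1 hc)
  have hofl : PySem.Set.ofList (pre ++ [l]) = PySem.Set.ofList pre ++ [l] := by
    rw [PySem.Set.ofList_append_singleton, PySem.Set.add_of_not_mem hnotp]
  have hsplit : pre ++ l :: suf = (pre ++ [l]) ++ suf := by simp
  rw [htake, hofl, hsplit, PySem.Set.ofList_append, PySem.Set.update_eq_append_filter, hofl,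
    PySem.List.index?_append_of_mem _ (show l ∈ PySem.Set.ofList pre ++ [l] by simp),
    PySem.List.index?_append_singleton_self _ _ hnotp]
  simp

-- ===== VERDICT (by name: the statement is the Claim_ definition above) =====
theorem to_letters_spec : Claim_equal_to_letters := by
  unfold Claim_equal_to_letters
  intro pattern _ _
  unfold Spec_to_letters to_letters to_letters_alt
  have h0 : (PySem.Dict.empty : PySem.Dict String Char) = pvDictOf [] := rfl
  have hlen : (0 : Nat) = ([] : List String).length := rfl
  rw [h0, hlen, pvLoop_eq ((PySem.Str.split? pattern "\n").getD []) [] [] List.nodup_nil]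
  set lines := ((PySem.Str.split? pattern "\n").getD []).filter (fun l => l ≠ "") with hlines
  have hdedup := pvFresh_eq_foldl_add ((PySem.Str.split? pattern "\n").getD []) []
  simp only [List.nil_append, ← hlines] at hdedup
  rw [hdedup, ← PySem.Set.ofList_eq_foldl]
  simp only [List.nil_append, List.length_nil]
  congr 1
  apply List.map_congr_left
  intro l hl
  have hmem : l ∈ PySem.Set.ofList lines := (PySem.Set.mem_ofList _ _).2 hl
  rw [pvDictOf_getD_index _ (PySem.Set.nodup_ofList _) _ hmem]
  obtain ⟨k, hk⟩ := Option.isSome_iff_exists.1 ((PySem.List.index?_isSome_iff _ _).2 hl)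
  have hcount := pvPrefix_count lines l k hk
  have hslice : PySem.List.slice lines none (some ((((PySem.List.index? lines l).getD 0 : Nat) : Int) + 1))
      = lines.take (k + 1) := by
    rw [hk]
    have : (((k : Nat) : Int) + 1) = (((k + 1 : Nat)) : Int) := by push_cast; ring
    simp only [Option.getD_some, this, PySem.List.slice_to_natCast]
  rw [hslice, hcount]
  push_cast
  ring_nf
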